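-- pv_equiv track=rewrite | github.com/omarelansary/New_KG_Benchamark | kg_pattern_stats.py | compose_support
-- ===== SOURCE A (Python) =====
-- from typing import Dict, Iterable, List, Sequence, Set, Tuple
--
-- def compose_support(
--     r1_h2t: Dict[int, Set[int]], r2_h2t: Dict[int, Set[int]], target_pairs: Set[Tuple[int, int]],
-- ) -> int:
--     """Compute number of (h,t) pairs generated by r1∘r2 that are present in target_pairs.
--
--     Uses set-based expansion for scalability.
--     """
--     support = 0
--     for h, xs in r1_h2t.items():
--         for x in xs:
--             ts = r2_h2t.get(x)
--             if not ts:
--                 continue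
--             for t in ts:
--                 if (h, t) in target_pairs:
--                     support += 1
--     return support
-- ===== SOURCE B (Python) =====
-- def compose_support(r1_h2t, r2_h2t, target_pairs):
--     # Build a reverse index of r2 (tail -> set of intermediate heads), then
--     # drive the count by the target pairs via a set intersection per pair.
--     r2_t2h = {}
--     for x, ts in r2_h2t.items():
--         for t in ts:
--             r2_t2h.setdefault(t, set()).add(x)
--     empty = set()
--     support = 0
--     for h, t in target_pairs:
--         support += len(r1_h2t.get(h, empty) & r2_t2h.get(t, empty))
--     return support
-- ===== Notes on version B (the rewrite author's own statement) =====
-- stated objective: alternative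
-- what changed: Instead of enumerating every two-hop path (h,x,t) and testing each against target_pairs, B builds a reverse index of r2 (tail -> set of intermediates) in one pass and then iterates over target_pairs, adding the size of the intersection r1_h2t[h] & r2_t2h[t] per pair, so work is driven by the target pairs rather than by path enumeration.
import Mathlib
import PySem

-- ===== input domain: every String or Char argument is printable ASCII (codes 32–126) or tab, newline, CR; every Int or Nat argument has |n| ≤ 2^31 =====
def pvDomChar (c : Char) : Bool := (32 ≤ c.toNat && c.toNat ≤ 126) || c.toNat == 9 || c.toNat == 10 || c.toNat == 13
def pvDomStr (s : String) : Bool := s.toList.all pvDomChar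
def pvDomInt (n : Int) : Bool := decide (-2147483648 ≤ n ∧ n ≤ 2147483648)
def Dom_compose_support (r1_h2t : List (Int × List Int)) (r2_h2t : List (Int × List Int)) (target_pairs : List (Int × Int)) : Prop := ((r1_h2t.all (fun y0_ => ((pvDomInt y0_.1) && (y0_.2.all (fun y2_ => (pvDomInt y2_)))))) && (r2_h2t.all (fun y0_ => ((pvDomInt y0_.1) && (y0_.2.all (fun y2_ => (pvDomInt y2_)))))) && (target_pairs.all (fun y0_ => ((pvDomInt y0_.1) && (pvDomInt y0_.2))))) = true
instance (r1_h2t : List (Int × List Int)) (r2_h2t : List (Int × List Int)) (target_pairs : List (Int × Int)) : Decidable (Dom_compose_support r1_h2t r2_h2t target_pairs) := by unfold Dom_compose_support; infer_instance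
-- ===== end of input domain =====

-- B replaces A's exhaustive two-hop path enumeration by a reverse index of r2 plus a
-- target-pair-driven intersection count (objective: alternative algorithm, same exact result).

-- ===== PORT A =====
-- The assoc-list / element-list arguments denote Python dicts / sets; both ports first
-- normalise them exactly as Python's dict()/set() construction does (overwrite / dedup).
-- body of A's "for x in xs" loop, factored as a named helper (same code, step for step)
def pvAInner (d2 : PySem.Dict Int (List Int)) (tset : PySem.Set (Int × Int)) (h support x : Int) : Int :=
  match d2.get? x with
  | none => support                      -- r2_h2t.get(x) is None: continue
  | some ts =>
    if ts = [] then support              -- empty set is falsy: continue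
    else ts.foldl (fun support t =>
      if PySem.Set.contains tset (h, t) then support + 1 else support) support

def compose_support (r1_h2t : List (Int × List Int)) (r2_h2t : List (Int × List Int)) (target_pairs : List (Int × Int)) : Int :=
  let d1 : PySem.Dict Int (List Int) := PySem.Dict.ofList (r1_h2t.map (fun p => (p.1, PySem.Set.ofList p.2)))
  let d2 : PySem.Dict Int (List Int) := PySem.Dict.ofList (r2_h2t.map (fun p => (p.1, PySem.Set.ofList p.2)))
  let tset : PySem.Set (Int × Int) := PySem.Set.ofList target_pairs
  d1.items.foldl (fun support hxs => hxs.2.foldl (pvAInner d2 tset hxs.1) support) 0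

-- ===== PORT B =====
def compose_support_alt (r1_h2t : List (Int × List Int)) (r2_h2t : List (Int × List Int)) (target_pairs : List (Int × Int)) : Int :=
  let d1 : PySem.Dict Int (List Int) := PySem.Dict.ofList (r1_h2t.map (fun p => (p.1, PySem.Set.ofList p.2)))
  let d2 : PySem.Dict Int (List Int) := PySem.Dict.ofList (r2_h2t.map (fun p => (p.1, PySem.Set.ofList p.2)))
  let tset : PySem.Set (Int × Int) := PySem.Set.ofList target_pairs
  let rev : PySem.Dict Int (PySem.Set Int) := d2.items.foldl (fun r xts =>
    xts.2.foldl (fun r t => r.modify t PySem.Set.empty (fun s => PySem.Set.add s xts.1)) r)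
    PySem.Dict.empty
  tset.foldl (fun support ht =>
    support + PySem.Set.len (PySem.Set.inter (d1.getD ht.1 PySem.Set.empty) (rev.getD ht.2 PySem.Set.empty))) 0

-- ===== PRECONDITION & SPEC =====
def Spec_compose_support (r1_h2t : List (Int × List Int)) (r2_h2t : List (Int × List Int)) (target_pairs : List (Int × Int)) (out : Int) : Prop := out = compose_support_alt r1_h2t r2_h2t target_pairs
instance (r1_h2t : List (Int × List Int)) (r2_h2t : List (Int × List Int)) (target_pairs : List (Int × Int)) (out : Int) : Decidable (Spec_compose_support r1_h2t r2_h2t target_pairs out) := by unfold Spec_compose_support; infer_instance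

-- ===== CLAIM (what is proved, stated in full; the proofs are below) =====
def Claim_equal_compose_support : Prop := ∀ (r1_h2t : List (Int × List Int)) (r2_h2t : List (Int × List Int)) (target_pairs : List (Int × Int)), Dom_compose_support r1_h2t r2_h2t target_pairs → Spec_compose_support r1_h2t r2_h2t target_pairs (compose_support r1_h2t r2_h2t target_pairs)

-- ===== LEMMAS AND PROOFS =====

-- abbreviations for the normalised dicts / the reverse index (proof helpers only)
def pvD (l : List (Int × List Int)) : PySem.Dict Int (List Int) :=
  PySem.Dict.ofList (l.map (fun p => (p.1, PySem.Set.ofList p.2)))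

def pvRev (d : PySem.Dict Int (List Int)) : PySem.Dict Int (PySem.Set Int) :=
  d.items.foldl (fun r p => p.2.foldl (fun r t' => r.modify t' PySem.Set.empty (fun s => PySem.Set.add s p.1)) r)
    PySem.Dict.empty

-- count of common elements of two duplicate-free lists is symmetric
theorem pv_countP_mem_comm {α : Type} [DecidableEq α] (a b : List α) (ha : a.Nodup) (hb : b.Nodup) :
    a.countP (fun x => decide (x ∈ b)) = b.countP (fun x => decide (x ∈ a)) := by
  have h1 : (a.filter (fun x => decide (x ∈ b))).Nodup := List.Nodup.filter _ ha
  have h2 : (b.filter (fun x => decide (x ∈ a))).Nodup := List.Nodup.filter _ hb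
  have hp : List.Perm (a.filter (fun x => decide (x ∈ b))) (b.filter (fun x => decide (x ∈ a))) := by
    rw [List.perm_ext_iff_of_nodup h1 h2]; intro x; simp; tauto
  rw [List.countP_eq_length_filter, List.countP_eq_length_filter]
  exact hp.length_eq

-- swapping two nested list sums of integers
theorem pv_sum_swap {α β : Type} (A : List α) (B : List β) (f : α → β → Int) :
    (A.map (fun a => (B.map (fun b => f a b)).sum)).sum
      = (B.map (fun b => (A.map (fun a => f a b)).sum)).sum := by
  induction A with
  | nil => simp
  | cons x xs ih =>
      simp only [List.map_cons, List.sum_cons, ih]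
      rw [← PySem.List.sum_map_add_int]

-- a sum over an association list with duplicate-free keys that picks one key
theorem pv_sum_pick_list {α : Type} (l : List (Int × α)) (h : Int) (v : α) (g : α → Int) :
    (l.map Prod.fst).Nodup → (h, v) ∈ l →
    (l.map (fun p => if p.1 = h then g p.2 else 0)).sum = g v := by
  induction l with
  | nil => intro _ hm; cases hm
  | cons p ps ih =>
      intro hnd hm
      simp only [List.map_cons, List.nodup_cons] at hnd
      rcases List.mem_cons.mp hm with hm | hm
      · subst hm
        simp only [List.map_cons, List.sum_cons]
        have hz : (ps.map (fun p => if p.1 = h then g p.2 else 0)).sum = 0 := by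
          apply List.sum_eq_zero
          intro y hy
          simp only [List.mem_map] at hy
          obtain ⟨q, hq, rfl⟩ := hy
          have : q.1 ≠ h := fun he => hnd.1 (he ▸ (List.mem_map_of_mem hq : q.1 ∈ ps.map Prod.fst))
          simp [this]
        simp [hz]
      · have hne : p.1 ≠ h := by
          intro he
          exact hnd.1 (he ▸ (List.mem_map_of_mem hm : (h, v).1 ∈ ps.map Prod.fst))
        simp only [List.map_cons, List.sum_cons, if_neg hne, zero_add]
        exact ih hnd.2 hm

theorem pv_sum_pick (d : PySem.Dict Int (List Int)) (hnd : d.keys.Nodup) (h : Int)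
    (g : List Int → Int) (hg : g [] = 0) :
    (d.items.map (fun p => if p.1 = h then g p.2 else 0)).sum = g (d.getD h []) := by
  by_cases hc : d.contains h = true
  · rw [PySem.Dict.contains_iff_mem_keys] at hc
    have hex : ∃ v, (h, v) ∈ d.items := by
      simp only [PySem.Dict.keys, List.mem_map] at hc
      obtain ⟨p, hp, he⟩ := hc
      exact ⟨p.2, by rw [← he]; simpa using hp⟩
    obtain ⟨v, hv⟩ := hex
    rw [PySem.Dict.getD_of_get?_eq_some d [] (PySem.Dict.get?_of_mem_items d hv hnd)]
    exact pv_sum_pick_list d.items h v g hnd hv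
  · rw [PySem.Dict.getD_of_not_contains d [] (by simpa using hc), hg]
    apply List.sum_eq_zero
    intro y hy
    simp only [List.mem_map] at hy
    obtain ⟨q, hq, rfl⟩ := hy
    have : q.1 ≠ h := by
      intro he
      exact hc (by rw [PySem.Dict.contains_iff_mem_keys, ← he]; exact PySem.Dict.mem_keys_of_mem_items d hq)
    simp [this]

-- reverse-index construction: membership, inner loop
theorem pv_rev_inner_mem (ts : List Int) (x0 : Int) (r : PySem.Dict Int (PySem.Set Int)) (t x : Int) :
    x ∈ (ts.foldl (fun r t' => r.modify t' PySem.Set.empty (fun s => PySem.Set.add s x0)) r).getD t PySem.Set.empty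
      ↔ x ∈ r.getD t PySem.Set.empty ∨ (x = x0 ∧ t ∈ ts) := by
  induction ts generalizing r with
  | nil => simp
  | cons t' rest ih =>
      simp only [List.foldl_cons]
      rw [ih]
      rw [PySem.Dict.getD_modify]
      by_cases he : t = t'
      · subst he
        simp [PySem.Set.mem_add]
        tauto
      · simp only [if_neg he, List.mem_cons]
        tauto

-- reverse-index construction: membership, outer loop
theorem pv_rev_mem_aux (l : List (Int × List Int)) (r : PySem.Dict Int (PySem.Set Int)) (t x : Int) :
    x ∈ (l.foldl (fun r p => p.2.foldl (fun r t' => r.modify t' PySem.Set.empty (fun s => PySem.Set.add s p.1)) r) r).getD t PySem.Set.empty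
      ↔ x ∈ r.getD t PySem.Set.empty ∨ ∃ p ∈ l, p.1 = x ∧ t ∈ p.2 := by
  induction l generalizing r with
  | nil => simp
  | cons p ps ih =>
      simp only [List.foldl_cons]
      rw [ih, pv_rev_inner_mem]
      simp only [List.mem_cons]
      constructor
      · rintro ((h | ⟨hx, ht⟩) | ⟨q, hq, hx, ht⟩)
        · exact Or.inl h
        · exact Or.inr ⟨p, Or.inl rfl, hx.symm, ht⟩
        · exact Or.inr ⟨q, Or.inr hq, hx, ht⟩
      · rintro (h | ⟨q, rfl | hq, hx, ht⟩)
        · exact Or.inl (Or.inl h)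
        · exact Or.inl (Or.inr ⟨hx.symm, ht⟩)
        · exact Or.inr ⟨q, hq, hx, ht⟩

-- duplicate-free-keys lookup as an items-membership statement
theorem pv_mem_getD_iff (d : PySem.Dict Int (List Int)) (hnd : d.keys.Nodup) (x t : Int) :
    (∃ p ∈ d.items, p.1 = x ∧ t ∈ p.2) ↔ t ∈ d.getD x [] := by
  constructor
  · rintro ⟨p, hp, rfl, ht⟩
    rwa [PySem.Dict.getD_of_get?_eq_some d [] (PySem.Dict.get?_of_mem_items d (by simpa using hp) hnd)]
  · intro ht
    cases hg : d.get? x with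
    | none => rw [PySem.Dict.getD_of_get?_eq_none d [] hg] at ht; cases ht
    | some ts =>
        rw [PySem.Dict.getD_of_get?_eq_some d [] hg] at ht
        exact ⟨(x, ts), PySem.Dict.mem_items_of_get?_eq_some d hg, rfl, ht⟩

theorem pv_rev_mem (d : PySem.Dict Int (List Int)) (hnd : d.keys.Nodup) (t x : Int) :
    x ∈ (pvRev d).getD t PySem.Set.empty ↔ t ∈ d.getD x [] := by
  unfold pvRev
  rw [pv_rev_mem_aux]
  rw [PySem.Dict.getD_empty]
  simp only [PySem.Set.empty, List.not_mem_nil, false_or]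
  exact pv_mem_getD_iff d hnd x t

-- every value of the normalised dicts is duplicate-free
theorem pv_values_sub (l : List (Int × List Int)) (d : PySem.Dict Int (List Int)) :
    ∀ v ∈ (l.foldl (fun d p => d.insert p.1 p.2) d).values, v ∈ d.values ∨ v ∈ l.map Prod.snd := by
  induction l generalizing d with
  | nil => intro v hv; exact Or.inl hv
  | cons p ps ih =>
      intro v hv
      rcases ih _ v hv with h | h
      · rcases PySem.Dict.mem_values_insert d p.1 p.2 v h with h | h
        · exact Or.inr (by simp [h])
        · exact Or.inl h
      · exact Or.inr (by simp [List.mem_map] at h ⊢; tauto)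

theorem pv_getD_nodup (l : List (Int × List Int)) (x : Int) :
    ((pvD l).getD x []).Nodup := by
  cases hg : (pvD l).get? x with
  | none => rw [PySem.Dict.getD_of_get?_eq_none _ [] hg]; exact List.nodup_nil
  | some ts =>
      rw [PySem.Dict.getD_of_get?_eq_some _ [] hg]
      have hv : ts ∈ (pvD l).values := by
        have hm := PySem.Dict.mem_items_of_get?_eq_some _ hg
        simp only [PySem.Dict.values]
        exact List.mem_map_of_mem hm
      have hsub := pv_values_sub (l.map (fun p : Int × List Int => (p.1, PySem.Set.ofList p.2))) PySem.Dict.empty ts hv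
      rcases hsub with h | h
      · simp [PySem.Dict.empty, PySem.Dict.values] at h
      · simp only [List.map_map, List.mem_map] at h
        obtain ⟨q, _, rfl⟩ := h
        exact PySem.Set.nodup_ofList _

theorem pv_keys_nodup (l : List (Int × List Int)) : (pvD l).keys.Nodup :=
  PySem.Dict.nodup_keys_ofList _

-- shape of port A as a double sum of counts
theorem pv_A_inner_eq (d2 : PySem.Dict Int (List Int)) (tset : PySem.Set (Int × Int)) (h support x : Int) :
    pvAInner d2 tset h support x
      = support + ((List.countP (fun t => PySem.Set.contains tset (h, t)) (d2.getD x [])) : Int) := by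
  unfold pvAInner
  cases hg : d2.get? x with
  | none => rw [PySem.Dict.getD_of_get?_eq_none d2 [] hg]; simp
  | some ts =>
      rw [PySem.Dict.getD_of_get?_eq_some d2 [] hg]
      dsimp only
      by_cases he : ts = []
      · subst he; simp
      · rw [if_neg he, PySem.List.foldl_count_if]

theorem pv_A_shape (r1_h2t r2_h2t : List (Int × List Int)) (target_pairs : List (Int × Int)) :
    compose_support r1_h2t r2_h2t target_pairs
      = ((pvD r1_h2t).items.map (fun p =>
          (p.2.map (fun x =>
            ((List.countP (fun t => PySem.Set.contains (PySem.Set.ofList target_pairs) (p.1, t))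
              ((pvD r2_h2t).getD x [])) : Int))).sum)).sum := by
  unfold compose_support
  show ((pvD r1_h2t).items.foldl (fun support hxs =>
      hxs.2.foldl (pvAInner (pvD r2_h2t) (PySem.Set.ofList target_pairs) hxs.1) support) 0) = _
  have h2 : ∀ (s : Int) (p : Int × List Int),
      p.2.foldl (pvAInner (pvD r2_h2t) (PySem.Set.ofList target_pairs) p.1) s
        = s + (p.2.map (fun x =>
            ((List.countP (fun t => PySem.Set.contains (PySem.Set.ofList target_pairs) (p.1, t))
              ((pvD r2_h2t).getD x [])) : Int))).sum := by
    intro s p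
    rw [show pvAInner (pvD r2_h2t) (PySem.Set.ofList target_pairs) p.1
          = fun s x => s + ((List.countP (fun t => PySem.Set.contains (PySem.Set.ofList target_pairs) (p.1, t))
              ((pvD r2_h2t).getD x [])) : Int)
        from funext fun s => funext fun x => pv_A_inner_eq _ _ _ s x]
    exact PySem.List.foldl_add _ _ _
  have h3 : (fun (support : Int) (hxs : Int × List Int) =>
        hxs.2.foldl (pvAInner (pvD r2_h2t) (PySem.Set.ofList target_pairs) hxs.1) support)
      = fun support hxs => support + (hxs.2.map (fun x =>
            ((List.countP (fun t => PySem.Set.contains (PySem.Set.ofList target_pairs) (hxs.1, t))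
              ((pvD r2_h2t).getD x [])) : Int))).sum :=
    funext fun s => funext fun p => h2 s p
  rw [h3, PySem.List.foldl_add, zero_add]

-- shape of port B as a sum of intersection sizes
theorem pv_B_shape (r1_h2t r2_h2t : List (Int × List Int)) (target_pairs : List (Int × Int)) :
    compose_support_alt r1_h2t r2_h2t target_pairs
      = ((PySem.Set.ofList target_pairs).map (fun q =>
          ((List.countP (fun x => decide (x ∈ (pvRev (pvD r2_h2t)).getD q.2 PySem.Set.empty))
            ((pvD r1_h2t).getD q.1 [])) : Int))).sum := by
  unfold compose_support_alt
  show ((PySem.Set.ofList target_pairs).foldl (fun support ht =>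
      support + PySem.Set.len (PySem.Set.inter ((pvD r1_h2t).getD ht.1 PySem.Set.empty)
        ((pvRev (pvD r2_h2t)).getD ht.2 PySem.Set.empty))) 0) = _
  rw [PySem.List.foldl_add, zero_add]
  refine congrArg List.sum (List.map_congr_left ?_)
  intro q hq
  show PySem.Set.len (PySem.Set.inter ((pvD r1_h2t).getD q.1 []) ((pvRev (pvD r2_h2t)).getD q.2 PySem.Set.empty)) = _
  rw [show ∀ (s t : PySem.Set Int), PySem.Set.len (PySem.Set.inter s t)
        = ((s.countP (fun x => t.contains x) : Int)) from fun s t => by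
          simp [PySem.Set.len, PySem.Set.inter, List.countP_eq_length_filter]]
  congr 1
  apply List.countP_congr
  intro x _
  simp

-- pointwise flip of a membership count between two duplicate-free lists
theorem pv_count_flip (u : List Int) (hu : u.Nodup) (v : List (Int × Int)) (hv : v.Nodup) (h : Int) :
    ((List.countP (fun t => PySem.Set.contains v (h, t)) u) : Int)
      = (v.map (fun q => if q.1 = h ∧ q.2 ∈ u then (1 : Int) else 0)).sum := by
  have e1 : List.countP (fun t => PySem.Set.contains v (h, t)) u
      = List.countP (fun y => decide (y ∈ v)) (u.map (fun t => (h, t))) := by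
    rw [List.countP_map]
    apply List.countP_congr
    intro t _
    simp
  have hmap : (u.map (fun t => (h, t))).Nodup :=
    hu.map (fun a b hab => by simpa using hab)
  have e2 : List.countP (fun y => decide (y ∈ v)) (u.map (fun t => (h, t)))
      = List.countP (fun q => decide (q ∈ u.map (fun t => (h, t)))) v := by
    have hcc := pv_countP_mem_comm (u.map (fun t => (h, t))) v hmap hv
    refine Eq.trans (List.countP_congr fun y _ => ?_) (Eq.trans hcc (List.countP_congr fun q _ => ?_)) <;> simp
  have e3 : List.countP (fun q => decide (q ∈ u.map (fun t => (h, t)))) v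
      = List.countP (fun q => decide (q.1 = h ∧ q.2 ∈ u)) v := by
    apply List.countP_congr
    intro q _
    simp only [decide_eq_true_eq, List.mem_map]
    constructor
    · rintro ⟨t, ht, rfl⟩; exact ⟨rfl, ht⟩
    · rintro ⟨h1, h2⟩; exact ⟨q.2, h2, by rw [← h1]⟩
  rw [e1, e2, e3, ← PySem.List.sum_map_ite_one_zero]
  refine congrArg List.sum (List.map_congr_left ?_)
  intro q _
  by_cases hc : q.1 = h ∧ q.2 ∈ u <;> simp [hc]

-- ===== VERDICT (by name: the statement is the Claim_ definition above) =====
theorem compose_support_spec : Claim_equal_compose_support := by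
  intro r1_h2t r2_h2t target_pairs _
  unfold Spec_compose_support
  rw [pv_A_shape, pv_B_shape]
  have hvnd : (PySem.Set.ofList target_pairs).Nodup := PySem.Set.nodup_ofList _
  -- step 1: turn each inner count into a sum over the target set
  have s1 : ((pvD r1_h2t).items.map (fun p =>
        (p.2.map (fun x =>
          ((List.countP (fun t => PySem.Set.contains (PySem.Set.ofList target_pairs) (p.1, t))
            ((pvD r2_h2t).getD x [])) : Int))).sum)).sum
      = ((pvD r1_h2t).items.map (fun p =>
          (p.2.map (fun x =>
            ((PySem.Set.ofList target_pairs).map (fun q =>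
              if q.1 = p.1 ∧ q.2 ∈ (pvD r2_h2t).getD x [] then (1 : Int) else 0)).sum)).sum)).sum := by
    refine congrArg List.sum (List.map_congr_left ?_)
    intro p _
    refine congrArg List.sum (List.map_congr_left ?_)
    intro x _
    exact pv_count_flip _ (pv_getD_nodup r2_h2t x) _ hvnd p.1
  rw [s1]
  -- step 2: swap the x-sum with the target-pair sum, for every p
  have s2 : ∀ p : Int × List Int,
      (p.2.map (fun x =>
          ((PySem.Set.ofList target_pairs).map (fun q =>
            if q.1 = p.1 ∧ q.2 ∈ (pvD r2_h2t).getD x [] then (1 : Int) else 0)).sum)).sum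
        = ((PySem.Set.ofList target_pairs).map (fun q =>
            (p.2.map (fun x =>
              if q.1 = p.1 ∧ q.2 ∈ (pvD r2_h2t).getD x [] then (1 : Int) else 0)).sum)).sum :=
    fun p => pv_sum_swap p.2 (PySem.Set.ofList target_pairs) _
  rw [List.map_congr_left (fun p _ => s2 p)]
  -- step 3: swap the items-sum with the target-pair sum
  rw [pv_sum_swap ((pvD r1_h2t).items) (PySem.Set.ofList target_pairs)
      (fun p q => (p.2.map (fun x =>
        if q.1 = p.1 ∧ q.2 ∈ (pvD r2_h2t).getD x [] then (1 : Int) else 0)).sum)]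
  -- step 4 and 5: collapse the items-sum at key q.1, then compare counts elementwise
  refine congrArg List.sum (List.map_congr_left ?_)
  intro q _
  have s4 : ((pvD r1_h2t).items.map (fun p =>
        (p.2.map (fun x =>
          if q.1 = p.1 ∧ q.2 ∈ (pvD r2_h2t).getD x [] then (1 : Int) else 0)).sum)).sum
      = ((pvD r1_h2t).items.map (fun p =>
          if p.1 = q.1 then
            (p.2.map (fun x => if q.2 ∈ (pvD r2_h2t).getD x [] then (1 : Int) else 0)).sum
          else 0)).sum := by
    refine congrArg List.sum (List.map_congr_left ?_)
    intro p _
    by_cases hp : p.1 = q.1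
    · rw [if_pos hp]
      refine congrArg List.sum (List.map_congr_left ?_)
      intro x _
      have : (q.1 = p.1 ∧ q.2 ∈ (pvD r2_h2t).getD x []) ↔ (q.2 ∈ (pvD r2_h2t).getD x []) := by
        constructor
        · exact fun hh => hh.2
        · exact fun hh => ⟨hp.symm, hh⟩
      simp only [this]
    · rw [if_neg hp]
      apply List.sum_eq_zero
      intro y hy
      simp only [List.mem_map] at hy
      obtain ⟨x, _, rfl⟩ := hy
      have : ¬ (q.1 = p.1 ∧ q.2 ∈ (pvD r2_h2t).getD x []) := fun hh => hp hh.1.symm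
      simp [this]
  rw [s4]
  rw [pv_sum_pick (pvD r1_h2t) (pv_keys_nodup r1_h2t) q.1
      (fun u => (u.map (fun x => if q.2 ∈ (pvD r2_h2t).getD x [] then (1 : Int) else 0)).sum)
      (by simp)]
  -- step 5: the collapsed sum is B's intersection count
  have s5 : (((pvD r1_h2t).getD q.1 []).map (fun x =>
        if q.2 ∈ (pvD r2_h2t).getD x [] then (1 : Int) else 0)).sum
      = ((List.countP (fun x => decide (x ∈ (pvRev (pvD r2_h2t)).getD q.2 PySem.Set.empty))
          ((pvD r1_h2t).getD q.1 [])) : Int) := by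
    rw [← PySem.List.sum_map_ite_one_zero]
    refine congrArg List.sum (List.map_congr_left ?_)
    intro x _
    have : q.2 ∈ (pvD r2_h2t).getD x [] ↔ x ∈ (pvRev (pvD r2_h2t)).getD q.2 PySem.Set.empty :=
      (pv_rev_mem (pvD r2_h2t) (pv_keys_nodup r2_h2t) q.2 x).symm
    by_cases hc : q.2 ∈ (pvD r2_h2t).getD x []
    · have hx : x ∈ (pvRev (pvD r2_h2t)).getD q.2 [] := this.mp hc
      simp [hc, hx]
    · have hx : ¬ x ∈ (pvRev (pvD r2_h2t)).getD q.2 [] := fun hh => hc (this.mpr hh)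
      simp [hc, hx]
  rw [s5]
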